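-- pv_equiv track=rewrite | github.com/xjdrew/sample | prime_factor.py | min_prime_factor
-- ===== SOURCE A (Python) =====
-- import sys, itertools
--
-- def min_prime_factor(x, f):
--     if x <= 1:
--         return x
--
--     f = f or 2
--     for i in itertools.count(f):
--         if x%i == 0:
--             return i
--         '''
--         if i > x>>1:
--             return x
--         '''
-- ===== SOURCE B (Python) =====
-- def min_prime_factor(x, f):
--     if x <= 1:
--         return x
--     f = f or 2
--     divs = []
--     d = 1
--     while d * d <= x:
--         if x % d == 0:
--             divs.append(d)
--             divs.append(x // d)
--         d += 1
--     return min(e for e in divs if e >= f)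
-- ===== Notes on version B (the rewrite author's own statement) =====
-- stated objective: alternative
-- what changed: A scans i = f, f+1, ... linearly until x % i == 0; B enumerates all positive divisor pairs (d, x//d) by trial division up to sqrt(x) once and returns the minimum divisor >= f, O(sqrt(x)) worst case instead of O(x); Pre_ excludes only inputs where A loops forever (x >= 2 with effective start f > x).
-- intended difference: For x >= 2 with a negative f, Python's sign-following modulo makes A return a negative number (e.g. -3 for x=6, f=-4), while B returns the smallest positive divisor of x that is >= f (here 1), the intended value for a factor-finding helper. — e.g. on min_prime_factor(6, some (-4)): A returns -3, B returns 1
import Mathlib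
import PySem

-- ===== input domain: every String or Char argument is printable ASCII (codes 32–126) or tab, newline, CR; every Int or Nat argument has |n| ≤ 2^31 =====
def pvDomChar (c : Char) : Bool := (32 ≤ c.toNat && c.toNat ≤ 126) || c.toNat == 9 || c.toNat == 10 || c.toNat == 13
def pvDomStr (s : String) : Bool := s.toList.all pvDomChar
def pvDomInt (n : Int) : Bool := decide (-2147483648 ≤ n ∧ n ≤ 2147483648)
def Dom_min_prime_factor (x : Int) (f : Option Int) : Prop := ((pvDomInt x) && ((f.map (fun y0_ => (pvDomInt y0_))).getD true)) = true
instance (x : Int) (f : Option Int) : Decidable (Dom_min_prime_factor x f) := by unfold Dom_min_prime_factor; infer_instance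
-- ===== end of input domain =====

-- B replaces A's linear scan from f with trial division up to sqrt(x) collecting
-- divisor pairs, returning the minimum divisor >= f (objective: alternative algorithm);
-- on negative f it intentionally returns the smallest positive divisor where A returns a negative one.

-- effective start value: Python's 'f = f or 2'
def pvEffF (f : Option Int) : Int :=
  match f with
  | none => 2
  | some v => if v = 0 then 2 else v

-- ===== PORT A =====
-- 'for i in itertools.count(f): if x % i == 0: return i', fuel-bounded
-- (fuel suffices on every input Pre_ admits; 0 is returned only off fuel).
def pvALoop (x : Int) : Nat → Int → Int
  | 0, _ => 0
  | n+1, i => if PySem.Int.mod x i = 0 then i else pvALoop x n (i+1)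

def min_prime_factor (x : Int) (f : Option Int) : Int :=
  if x ≤ 1 then x
  else
    pvALoop x ((x - pvEffF f).toNat + 1) (pvEffF f)

-- ===== PORT B =====
-- 'd = 1; while d*d <= x: if x % d == 0: divs += [d, x//d]; d += 1', fuel-bounded
-- (fuel x.toNat+1 always suffices since d*d ≤ x forces d ≤ x).
def pvBLoop (x : Int) : Nat → Int → List Int → List Int
  | 0, _, acc => acc
  | n+1, d, acc =>
      if d * d ≤ x then
        pvBLoop x n (d + 1)
          (if PySem.Int.mod x d = 0 then acc ++ [d, PySem.Int.floordiv x d] else acc)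
      else acc

def min_prime_factor_alt (x : Int) (f : Option Int) : Int :=
  if x ≤ 1 then x
  else
    let f' := pvEffF f
    let divs := pvBLoop x (x.toNat + 1) 1 []
    (PySem.List.min? (divs.filter (fun e => decide (f' ≤ e))) (fun e => e)).getD 0

-- ===== PRECONDITION & SPEC =====
-- Pre_ excludes exactly the inputs where A diverges: x ≥ 2 with an effective
-- start value (f or 2) strictly greater than x — there no i ≥ f divides x,
-- so A's loop never returns.
def Pre_min_prime_factor (x : Int) (f : Option Int) : Prop :=
  x ≤ 1 ∨ pvEffF f ≤ x
instance (x : Int) (f : Option Int) : Decidable (Pre_min_prime_factor x f) := by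
  unfold Pre_min_prime_factor; infer_instance

def pvWitness_min_prime_factor : Int × Option Int := (6, some 2)

-- For x ≥ 2 with a negative f, Python's sign-following modulo makes A return a negative
-- number (e.g. -3 for x = 6, f = -4), while B returns the smallest positive divisor of x
-- that is ≥ f (here 1), the intended value for a factor-finding helper.
def D_min_prime_factor (x : Int) (f : Option Int) : Prop :=
  2 ≤ x ∧ ∃ v, f = some v ∧ v < 0
instance (x : Int) (f : Option Int) : Decidable (D_min_prime_factor x f) := by
  unfold D_min_prime_factor; infer_instance

def Spec_min_prime_factor (x : Int) (f : Option Int) (out : Int) : Prop :=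
  ¬ D_min_prime_factor x f → out = min_prime_factor_alt x f
instance (x : Int) (f : Option Int) (out : Int) : Decidable (Spec_min_prime_factor x f out) := by
  unfold Spec_min_prime_factor; infer_instance

def pvDiffWitness_min_prime_factor : Int × Option Int := (6, some (-4))
def pvDiffWitnessOut_min_prime_factor : Int × Int := (-3, 1)

-- ===== CLAIM =====
def Claim_unchanged_min_prime_factor : Prop := ∀ (x : Int) (f : Option Int), Dom_min_prime_factor x f → Pre_min_prime_factor x f → Spec_min_prime_factor x f (min_prime_factor x f)
def Claim_changed_min_prime_factor : Prop := Dom_min_prime_factor (pvDiffWitness_min_prime_factor.1) (pvDiffWitness_min_prime_factor.2) ∧ Pre_min_prime_factor (pvDiffWitness_min_prime_factor.1) (pvDiffWitness_min_prime_factor.2) ∧ D_min_prime_factor (pvDiffWitness_min_prime_factor.1) (pvDiffWitness_min_prime_factor.2) ∧ min_prime_factor (pvDiffWitness_min_prime_factor.1) (pvDiffWitness_min_prime_factor.2) = pvDiffWitnessOut_min_prime_factor.1 ∧ min_prime_factor_alt (pvDiffWitness_min_prime_factor.1) (pvDiffWitness_min_prime_factor.2) = pvDiffWitnessOut_min_prime_factor.2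 ∧ pvDiffWitnessOut_min_prime_factor.1 ≠ pvDiffWitnessOut_min_prime_factor.2
def Claim_exact_min_prime_factor : Prop := ∀ (x : Int) (f : Option Int), Dom_min_prime_factor x f → Pre_min_prime_factor x f → D_min_prime_factor x f → min_prime_factor x f ≠ min_prime_factor_alt x f

-- ===== LEMMAS AND PROOFS =====

-- A's loop returns r as soon as r is the first index ≥ i dividing x (enough fuel given).
theorem pvALoop_eq_first (x : Int) :
    ∀ (n : Nat) (i r : Int), i ≤ r → PySem.Int.mod x r = 0 →
      (∀ j, i ≤ j → j < r → PySem.Int.mod x j ≠ 0) →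
      (r - i).toNat < n → pvALoop x n i = r := by
  intro n
  induction n with
  | zero => intro i r _ _ _ h; omega
  | succ n ih =>
    intro i r hir hr hfirst hfuel
    simp only [pvALoop]
    by_cases hi : PySem.Int.mod x i = 0
    · have : i = r := by
        by_contra hne
        exact hfirst i le_rfl (by omega) hi
      rw [if_pos hi]; exact this
    · have hir' : i ≠ r := fun h => hi (h ▸ hr)
      rw [if_neg hi]
      exact ih (i+1) r (by omega) hr (fun j h1 h2 => hfirst j (by omega) h2) (by omega)

-- membership in B's divisor list
theorem pvBLoop_mem (x : Int) (hx : 2 ≤ x) :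
    ∀ (n : Nat) (d : Int) (acc : List Int) (e : Int), 1 ≤ d → (x - d).toNat < n →
      (e ∈ pvBLoop x n d acc ↔
        e ∈ acc ∨ ∃ k, d ≤ k ∧ k * k ≤ x ∧ PySem.Int.mod x k = 0 ∧
          (e = k ∨ e = PySem.Int.floordiv x k)) := by
  intro n
  induction n with
  | zero => intro d acc e _ h; omega
  | succ n ih =>
    intro d acc e hd hfuel
    simp only [pvBLoop]
    by_cases hdd : d * d ≤ x
    · have hdx : d < x := by nlinarith
      rw [if_pos hdd, ih (d+1) _ e (by omega) (by omega)]
      constructor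
      · rintro (hmem | ⟨k, hk1, hk2, hk3, hk4⟩)
        · by_cases hm : PySem.Int.mod x d = 0
          · simp only [hm, if_pos, List.mem_append, List.mem_cons] at hmem
            rcases hmem with h | h | h | h
            · exact Or.inl h
            · exact Or.inr ⟨d, le_rfl, hdd, hm, Or.inl h⟩
            · exact Or.inr ⟨d, le_rfl, hdd, hm, Or.inr h⟩
            · cases h
          · simp only [hm, if_neg, not_false_iff] at hmem
            exact Or.inl hmem
        · exact Or.inr ⟨k, by omega, hk2, hk3, hk4⟩
      · rintro (hmem | ⟨k, hk1, hk2, hk3, hk4⟩)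
        · left; split <;> simp [hmem]
        · by_cases hkd : k = d
          · subst hkd
            left
            rw [if_pos hk3]
            simp only [List.mem_append, List.mem_cons, List.not_mem_nil]
            tauto
          · exact Or.inr ⟨k, by omega, hk2, hk3, hk4⟩
    · rw [if_neg hdd]
      constructor
      · exact Or.inl
      · rintro (h | ⟨k, hk1, _, _, _⟩)
        · exact h
        · exfalso; nlinarith

-- exact division facts
theorem pvFloordiv_mul (k c : Int) (hk : 0 < k) :
    PySem.Int.floordiv (k * c) k = c := by
  rw [PySem.Int.floordiv_eq_ediv_of_pos hk, Int.mul_ediv_cancel_left _ (by omega)]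

-- the full characterisation of B's divisor list: positive divisors of x
theorem pvDivs_mem (x : Int) (hx : 2 ≤ x) (e : Int) :
    e ∈ pvBLoop x (x.toNat + 1) 1 [] ↔ 1 ≤ e ∧ e ∣ x := by
  rw [pvBLoop_mem x hx _ 1 [] e le_rfl (by omega)]
  simp only [List.not_mem_nil, false_or]
  constructor
  · rintro ⟨k, hk1, hk2, hk3, hk4⟩
    have hkdvd : k ∣ x := (PySem.Int.mod_eq_zero_iff_dvd x k).1 hk3
    obtain ⟨c, hc⟩ := hkdvd
    have hc1 : 1 ≤ c := by nlinarith
    rcases hk4 with rfl | rfl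
    · exact ⟨hk1, ⟨c, hc⟩⟩
    · rw [hc, pvFloordiv_mul k c (by omega)]
      exact ⟨hc1, ⟨k, by linarith [hc, mul_comm k c]⟩⟩
  · rintro ⟨he1, c, hc⟩
    have hc1 : 1 ≤ c := by nlinarith
    by_cases hee : e * e ≤ x
    · exact ⟨e, he1, hee, (PySem.Int.mod_eq_zero_iff_dvd x e).2 ⟨c, hc⟩, Or.inl rfl⟩
    · refine ⟨c, hc1, ?_, (PySem.Int.mod_eq_zero_iff_dvd x c).2 ⟨e, by linarith [hc, mul_comm e c]⟩, Or.inr ?_⟩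
      · nlinarith
      · rw [hc, mul_comm e c, pvFloordiv_mul c e (by omega)]

-- B's filtered divisor list is nonempty and its min is a divisor ≥ f' (for f' ≤ x, x ≥ 2)
theorem pvB_min (x : Int) (hx : 2 ≤ x) (f' : Int) (hfx : f' ≤ x) :
    ∃ m, PySem.List.min? ((pvBLoop x (x.toNat + 1) 1 []).filter (fun e => decide (f' ≤ e))) (fun e => e) = some m ∧
      (1 ≤ m ∧ m ∣ x) ∧ f' ≤ m ∧
      (∀ j, f' ≤ j → 1 ≤ j → j ∣ x → m ≤ j) := by
  set divs := pvBLoop x (x.toNat + 1) 1 [] with hdivs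
  have hmem : ∀ e, e ∈ divs ↔ 1 ≤ e ∧ e ∣ x := fun e => pvDivs_mem x hx e
  set L := divs.filter (fun e => decide (f' ≤ e)) with hL
  have hxL : x ∈ L := by
    rw [hL, List.mem_filter]
    exact ⟨(hmem x).2 ⟨by omega, dvd_refl x⟩, by simp; omega⟩
  have hne : L ≠ [] := fun h => by simp [h] at hxL
  obtain ⟨m, hm⟩ : ∃ m, PySem.List.min? L (fun e => e) = some m := by
    cases hmin : PySem.List.min? L (fun e => e) with
    | none => exact absurd ((PySem.List.min?_eq_none_iff L _).1 hmin) hne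
    | some m => exact ⟨m, rfl⟩
  have hmL : m ∈ L := PySem.List.min?_mem hm
  refine ⟨m, hm, (hmem m).1 (List.mem_filter.1 hmL).1, by
      have := (List.mem_filter.1 hmL).2; simpa using this, ?_⟩
  intro j hj1 hj2 hjdvd
  have hjL : j ∈ L := by
    rw [hL, List.mem_filter]
    exact ⟨(hmem j).2 ⟨hj2, hjdvd⟩, by simp; omega⟩
  have := PySem.List.min?_isMin hm j hjL
  simpa using this

-- A's value for x ≥ 2, f' < 0: the negated maximal divisor ≤ -f' (always exists, 1 qualifies)
theorem pvA_neg (x : Int) (hx : 2 ≤ x) (f' : Int) (hneg : f' < 0) :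
    ∃ m, 1 ≤ m ∧ m ∣ x ∧ m ≤ -f' ∧
      pvALoop x ((x - f').toNat + 1) f' = -m := by
  -- m = max positive divisor of x that is ≤ -f'
  have hS : ∃ m, 1 ≤ m ∧ m ∣ x ∧ m ≤ -f' ∧ ∀ j, 1 ≤ j → j ∣ x → j ≤ -f' → j ≤ m := by
    -- take max over the (finite, nonempty) filtered divisor list
    set L := (pvBLoop x (x.toNat + 1) 1 []).filter (fun e => decide (e ≤ -f')) with hL
    have hmem : ∀ e, e ∈ pvBLoop x (x.toNat + 1) 1 [] ↔ 1 ≤ e ∧ e ∣ x := fun e => pvDivs_mem x hx e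
    have h1L : (1 : Int) ∈ L := by
      rw [hL, List.mem_filter]
      exact ⟨(hmem 1).2 ⟨le_rfl, one_dvd x⟩, by simp; omega⟩
    have hne : L ≠ [] := fun h => by simp [h] at h1L
    obtain ⟨m, hm⟩ : ∃ m, PySem.List.max? L (fun e => e) = some m := by
      cases hmax : PySem.List.max? L (fun e => e) with
      | none => exact absurd ((PySem.List.max?_eq_none_iff L _).1 hmax) hne
      | some m => exact ⟨m, rfl⟩
    have hmL : m ∈ L := PySem.List.max?_mem hm
    have hmd := (hmem m).1 (List.mem_filter.1 hmL).1
    refine ⟨m, hmd.1, hmd.2, by have := (List.mem_filter.1 hmL).2; simpa using this, ?_⟩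
    intro j hj1 hjd hjle
    have hjL : j ∈ L := by
      rw [hL, List.mem_filter]
      exact ⟨(hmem j).2 ⟨hj1, hjd⟩, by simp; omega⟩
    have := PySem.List.max?_isMax hm j hjL
    simpa using this
  obtain ⟨m, hm1, hmd, hmle, hmax⟩ := hS
  refine ⟨m, hm1, hmd, hmle, ?_⟩
  apply pvALoop_eq_first x _ f' (-m) (by omega)
  · exact (PySem.Int.mod_eq_zero_iff_dvd x (-m)).2 (neg_dvd.mpr hmd)
  · intro j hj1 hj2 hjmod
    have hjdvd : j ∣ x := (PySem.Int.mod_eq_zero_iff_dvd x j).1 hjmod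
    have := hmax (-j) (by omega) (neg_dvd.mpr hjdvd) (by omega)
    omega
  · omega

-- ===== VERDICT =====
theorem min_prime_factor_spec : Claim_unchanged_min_prime_factor := by
  intro x f _ hpre hnd
  unfold min_prime_factor min_prime_factor_alt
  by_cases hx : x ≤ 1
  · simp [hx]
  · have hx2 : 2 ≤ x := by omega
    rw [if_neg hx, if_neg hx]
    have hfx : pvEffF f ≤ x := by
      rcases hpre with h | h
      · omega
      · exact h
    set f' := pvEffF f with hf'
    have hf1 : 1 ≤ f' := by
      unfold D_min_prime_factor at hnd
      unfold pvEffF at hf'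
      rcases f with _ | v
      · simp [hf']
      · simp only [hf']
        split
        · omega
        · have : ¬ v < 0 := fun hv => hnd ⟨hx2, v, rfl, hv⟩
          omega
    obtain ⟨m, hm, hmdiv, hmge, hmin⟩ := pvB_min x hx2 f' hfx
    simp only [← hf', hm, Option.getD_some]
    apply pvALoop_eq_first x _ f' m hmge
    · exact (PySem.Int.mod_eq_zero_iff_dvd x m).2 hmdiv.2
    · intro j hj1 hj2 hjmod
      have hjdvd : j ∣ x := (PySem.Int.mod_eq_zero_iff_dvd x j).1 hjmod
      have := hmin j hj1 (by omega) hjdvd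
      omega
    · have : m ≤ x := Int.le_of_dvd (by omega) hmdiv.2
      omega

theorem min_prime_factor_changed : Claim_changed_min_prime_factor := by
  unfold Claim_changed_min_prime_factor; decide

theorem min_prime_factor_tight : Claim_exact_min_prime_factor := by
  intro x f _ hpre hd
  obtain ⟨hx2, v, rfl, hv⟩ := hd
  have hf' : pvEffF (some v) = v := by
    unfold pvEffF; simp; omega
  unfold min_prime_factor min_prime_factor_alt
  rw [if_neg (by omega), if_neg (by omega)]
  obtain ⟨m, hm1, _, _, hA⟩ := pvA_neg x hx2 v hv
  obtain ⟨m', hm', hm'div, _, _⟩ := pvB_min x hx2 v (by omega)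
  simp only [hf', hA, hm', Option.getD_some]
  omega
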